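-- pv_equiv track=rewrite | github.com/samlew89/washdc-playbook | rescore_venues.py | categorize_from_yelp
-- ===== SOURCE A (Python) =====
-- def categorize_from_yelp(categories):
--     """Map Yelp categories to our categories."""
--     category_aliases = [c.get("alias", "") for c in categories]
--
--     if any(c in category_aliases for c in ["bars", "cocktailbars", "divebars", "sportsbars", "whiskeybars", "beerbar"]):
--         return "Bar"
--     if any(c in category_aliases for c in ["breweries", "brewpubs"]):
--         return "Brewery"
--     if any(c in category_aliases for c in ["wine_bars", "wineries"]):
--         return "Wine Bar"
--     if any(c in category_aliases for c in ["coffee", "coffeeroasteries"]):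
--         return "Coffee"
--     if any(c in category_aliases for c in ["bakeries"]):
--         return "Bakery"
--     if any(c in category_aliases for c in ["cafes", "cafeteria"]):
--         return "Cafe"
--     if any(c in category_aliases for c in ["nightlife", "danceclubs", "musicvenues"]):
--         return "Nightclub"
--     return "Restaurant"
-- ===== SOURCE B (Python) =====
-- _ALIAS_TABLE = {
--     "bars": (0, "Bar"), "cocktailbars": (0, "Bar"), "divebars": (0, "Bar"),
--     "sportsbars": (0, "Bar"), "whiskeybars": (0, "Bar"), "beerbar": (0, "Bar"),
--     "breweries": (1, "Brewery"), "brewpubs": (1, "Brewery"),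
--     "wine_bars": (2, "Wine Bar"), "wineries": (2, "Wine Bar"),
--     "coffee": (3, "Coffee"), "coffeeroasteries": (3, "Coffee"),
--     "bakeries": (4, "Bakery"),
--     "cafes": (5, "Cafe"), "cafeteria": (5, "Cafe"),
--     "nightlife": (6, "Nightclub"), "danceclubs": (6, "Nightclub"),
--     "musicvenues": (6, "Nightclub"),
-- }
--
-- def categorize_from_yelp(categories):
--     """Map Yelp categories to our categories."""
--     best = None
--     for c in categories:
--         entry = _ALIAS_TABLE.get(c.get("alias", ""))
--         if entry is not None and (best is None or entry[0] < best[0]):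
--             best = entry
--     return "Restaurant" if best is None else best[1]
-- ===== Notes on version B (the rewrite author's own statement) =====
-- stated objective: idiomatic
-- what changed: Replaces the seven sequential any()-scans over fixed alias lists with one precomputed alias->(rank,label) table and a single min-rank pass over the venue's categories.
import Mathlib
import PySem

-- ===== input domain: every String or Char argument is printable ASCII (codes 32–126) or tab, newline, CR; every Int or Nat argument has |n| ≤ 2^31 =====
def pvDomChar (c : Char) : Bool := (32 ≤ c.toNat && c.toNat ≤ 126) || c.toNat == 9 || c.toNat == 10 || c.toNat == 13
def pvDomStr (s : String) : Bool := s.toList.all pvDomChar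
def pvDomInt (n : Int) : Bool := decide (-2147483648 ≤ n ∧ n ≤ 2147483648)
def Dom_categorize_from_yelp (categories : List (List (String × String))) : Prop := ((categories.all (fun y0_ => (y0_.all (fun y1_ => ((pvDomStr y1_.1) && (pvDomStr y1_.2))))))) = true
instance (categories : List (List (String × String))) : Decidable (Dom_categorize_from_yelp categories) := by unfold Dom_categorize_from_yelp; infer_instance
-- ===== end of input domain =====

-- B replaces A's seven any()-scans by a single alias->(rank,label) table and one min-rank pass (idiomatic).

-- c.get("alias", "") — shared by both Pythons verbatim
def pvAliasOf (c : List (String × String)) : String := (PySem.Dict.mk c).getD "alias" ""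

-- ===== PORT A =====
def categorize_from_yelp (categories : List (List (String × String))) : String :=
  let category_aliases := categories.map (fun c => pvAliasOf c)
  if (["bars", "cocktailbars", "divebars", "sportsbars", "whiskeybars", "beerbar"].any
      (fun c => category_aliases.contains c)) then "Bar"
  else if (["breweries", "brewpubs"].any (fun c => category_aliases.contains c)) then "Brewery"
  else if (["wine_bars", "wineries"].any (fun c => category_aliases.contains c)) then "Wine Bar"
  else if (["coffee", "coffeeroasteries"].any (fun c => category_aliases.contains c)) then "Coffee"
  else if (["bakeries"].any (fun c => category_aliases.contains c)) then "Bakery"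
  else if (["cafes", "cafeteria"].any (fun c => category_aliases.contains c)) then "Cafe"
  else if (["nightlife", "danceclubs", "musicvenues"].any (fun c => category_aliases.contains c)) then "Nightclub"
  else "Restaurant"

-- ===== PORT B =====
def pvTable : PySem.Dict String (Nat × String) := PySem.Dict.mk
  [("bars", (0, "Bar")), ("cocktailbars", (0, "Bar")), ("divebars", (0, "Bar")),
   ("sportsbars", (0, "Bar")), ("whiskeybars", (0, "Bar")), ("beerbar", (0, "Bar")),
   ("breweries", (1, "Brewery")), ("brewpubs", (1, "Brewery")),
   ("wine_bars", (2, "Wine Bar")), ("wineries", (2, "Wine Bar")),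
   ("coffee", (3, "Coffee")), ("coffeeroasteries", (3, "Coffee")),
   ("bakeries", (4, "Bakery")),
   ("cafes", (5, "Cafe")), ("cafeteria", (5, "Cafe")),
   ("nightlife", (6, "Nightclub")), ("danceclubs", (6, "Nightclub")),
   ("musicvenues", (6, "Nightclub"))]

def pvStep (best : Option (Nat × String)) (c : List (String × String)) : Option (Nat × String) :=
  match pvTable.get? (pvAliasOf c) with
  | none => best
  | some e =>
    match best with
    | none => some e
    | some b => if e.1 < b.1 then some e else some b

def categorize_from_yelp_alt (categories : List (List (String × String))) : String :=
  match categories.foldl pvStep none with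
  | none => "Restaurant"
  | some b => b.2

-- ===== PRECONDITION & SPEC =====
def Spec_categorize_from_yelp (categories : List (List (String × String))) (out : String) : Prop := out = categorize_from_yelp_alt categories
instance (categories : List (List (String × String))) (out : String) : Decidable (Spec_categorize_from_yelp categories out) := by unfold Spec_categorize_from_yelp; infer_instance

-- ===== CLAIM (what is proved, stated in full; the proofs are below) =====
def Claim_equal_categorize_from_yelp : Prop := ∀ (categories : List (List (String × String))), Dom_categorize_from_yelp categories → Spec_categorize_from_yelp categories (categorize_from_yelp categories)

-- ===== LEMMAS AND PROOFS =====

-- rank of an alias according to the table (proof-side view of B)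
def pvRank (a : String) : Option Nat := (pvTable.get? a).map Prod.fst

def pvLabel (k : Nat) : String :=
  match k with
  | 0 => "Bar" | 1 => "Brewery" | 2 => "Wine Bar" | 3 => "Coffee"
  | 4 => "Bakery" | 5 => "Cafe" | _ => "Nightclub"

-- every table entry is (k, pvLabel k) with k ≤ 6
theorem pvTable_entry (a : String) (e : Nat × String) (h : pvTable.get? a = some e) :
    e = (e.1, pvLabel e.1) ∧ e.1 ≤ 6 := by
  have h2 : (a, e) ∈ [("bars", ((0:Nat), "Bar")), ("cocktailbars", (0, "Bar")), ("divebars", (0, "Bar")),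
      ("sportsbars", (0, "Bar")), ("whiskeybars", (0, "Bar")), ("beerbar", (0, "Bar")),
      ("breweries", (1, "Brewery")), ("brewpubs", (1, "Brewery")),
      ("wine_bars", (2, "Wine Bar")), ("wineries", (2, "Wine Bar")),
      ("coffee", (3, "Coffee")), ("coffeeroasteries", (3, "Coffee")),
      ("bakeries", (4, "Bakery")),
      ("cafes", (5, "Cafe")), ("cafeteria", (5, "Cafe")),
      ("nightlife", (6, "Nightclub")), ("danceclubs", (6, "Nightclub")),
      ("musicvenues", (6, "Nightclub"))] := PySem.Dict.mem_items_of_get?_eq_some _ h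
  fin_cases h2 <;> exact ⟨rfl, by decide⟩

-- rank-only min fold
def pvMinO (b : Option Nat) (k : Option Nat) : Option Nat :=
  match k with
  | none => b
  | some k =>
    match b with
    | none => some k
    | some j => if k < j then some k else some j

theorem pvMinO_eq_none (b k : Option Nat) : pvMinO b k = none ↔ b = none ∧ k = none := by
  cases k with
  | none => cases b <;> simp [pvMinO]
  | some r =>
    cases b with
    | none => simp [pvMinO]
    | some j => simp only [pvMinO]; split <;> simp

theorem pvMinO_eq_some (b k : Option Nat) (j : Nat) (h : pvMinO b k = some j) :
    (b = some j ∨ k = some j) ∧ (∀ i, b = some i → j ≤ i) ∧ (∀ i, k = some i → j ≤ i) := by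
  cases k with
  | none =>
    cases b <;> simp [pvMinO] at h
    subst h; simp
  | some r =>
    cases b with
    | none =>
      simp [pvMinO] at h; subst h; simp
    | some bb =>
      simp only [pvMinO] at h
      split at h <;> rename_i hlt <;> injection h with h <;> subst h
      · exact ⟨Or.inr rfl, fun i hi => by injection hi with hi; omega, fun i hi => by injection hi with hi; omega⟩
      · exact ⟨Or.inl rfl, fun i hi => by injection hi with hi; omega, fun i hi => by injection hi with hi; omega⟩

theorem pvFold_eq_min (l : List (List (String × String))) :
    ∀ acc : Option Nat,
      l.foldl pvStep (acc.map (fun k => (k, pvLabel k)))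
        = (l.foldl (fun b c => pvMinO b (pvRank (pvAliasOf c))) acc).map (fun k => (k, pvLabel k)) := by
  induction l with
  | nil => intro acc; rfl
  | cons c l ih =>
    intro acc
    have step : pvStep (acc.map (fun k => (k, pvLabel k))) c
        = (pvMinO acc (pvRank (pvAliasOf c))).map (fun k => (k, pvLabel k)) := by
      cases h : pvTable.get? (pvAliasOf c) with
      | none =>
        have hr : pvRank (pvAliasOf c) = none := by rw [pvRank, h]; rfl
        simp only [pvStep, h, hr, pvMinO]
      | some e =>
        obtain ⟨he, -⟩ := pvTable_entry _ _ h
        have hr : pvRank (pvAliasOf c) = some e.1 := by rw [pvRank, h]; rfl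
        cases acc with
        | none => simp only [pvStep, h, hr, pvMinO, Option.map_none, Option.map_some]; rw [← he]
        | some j =>
          by_cases hlt : e.1 < j <;>
            · simp only [pvStep, h, hr, pvMinO, Option.map_some, hlt]
              simp [← he]
    simp only [List.foldl_cons, step]
    exact ih _

-- min-fold characterization: none case
theorem pvMin_none (l : List (List (String × String))) :
    ∀ acc : Option Nat,
      (l.foldl (fun b c => pvMinO b (pvRank (pvAliasOf c))) acc = none)
        ↔ (acc = none ∧ ∀ c ∈ l, pvRank (pvAliasOf c) = none) := by
  induction l with
  | nil => intro acc; simp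
  | cons c l ih =>
    intro acc
    simp only [List.foldl_cons, ih, pvMinO_eq_none, List.mem_cons]
    constructor
    · rintro ⟨⟨ha, hr⟩, hall⟩
      refine ⟨ha, fun c' hc' => ?_⟩
      rcases hc' with rfl | hc'
      · exact hr
      · exact hall c' hc'
    · rintro ⟨ha, hall⟩
      exact ⟨⟨ha, hall c (Or.inl rfl)⟩, fun c' hc' => hall c' (Or.inr hc')⟩

-- min-fold characterization: some case
theorem pvMin_some (l : List (List (String × String))) :
    ∀ acc : Option Nat, ∀ k : Nat,
      (l.foldl (fun b c => pvMinO b (pvRank (pvAliasOf c))) acc = some k)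
        → ((acc = some k ∨ ∃ c ∈ l, pvRank (pvAliasOf c) = some k)
            ∧ (∀ j, acc = some j → k ≤ j)
            ∧ (∀ c ∈ l, ∀ j, pvRank (pvAliasOf c) = some j → k ≤ j)) := by
  induction l with
  | nil => intro acc k h; simp_all
  | cons c l ih =>
    intro acc k h
    simp only [List.foldl_cons] at h
    obtain ⟨hex, hacc, hall⟩ := ih _ _ h
    cases hm : pvMinO acc (pvRank (pvAliasOf c)) with
    | none =>
      obtain ⟨ha, hr⟩ := (pvMinO_eq_none _ _).1 hm
      rw [hm] at hex hacc
      refine ⟨?_, ?_, ?_⟩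
      · rcases hex with hx | ⟨c', hc', hr'⟩
        · cases hx
        · exact Or.inr ⟨c', List.mem_cons_of_mem _ hc', hr'⟩
      · intro j hj; rw [ha] at hj; cases hj
      · intro c' hc' j hj
        rcases List.mem_cons.1 hc' with rfl | hc'
        · rw [hr] at hj; cases hj
        · exact hall c' hc' j hj
    | some m =>
      rw [hm] at hex hacc
      obtain ⟨hor, hba, hbr⟩ := pvMinO_eq_some _ _ _ hm
      have hkm : k ≤ m := hacc m rfl
      refine ⟨?_, ?_, ?_⟩
      · rcases hex with hx | ⟨c', hc', hr'⟩
        · injection hx with hx; subst hx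
          rcases hor with hb | hr'
          · exact Or.inl hb
          · exact Or.inr ⟨c, List.mem_cons_self, hr'⟩
        · exact Or.inr ⟨c', List.mem_cons_of_mem _ hc', hr'⟩
      · intro j hj; have := hba j hj; omega
      · intro c' hc' j hj
        rcases List.mem_cons.1 hc' with rfl | hc'
        · have := hbr j hj; omega
        · exact hall c' hc' j hj

-- the seven alias groups, exactly A's literal lists, indexed by rank
def pvGroups : Nat → List String
  | 0 => ["bars", "cocktailbars", "divebars", "sportsbars", "whiskeybars", "beerbar"]
  | 1 => ["breweries", "brewpubs"]
  | 2 => ["wine_bars", "wineries"]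
  | 3 => ["coffee", "coffeeroasteries"]
  | 4 => ["bakeries"]
  | 5 => ["cafes", "cafeteria"]
  | 6 => ["nightlife", "danceclubs", "musicvenues"]
  | _ => []

theorem pvRank_some (a : String) (i : Nat) (h : pvRank a = some i) : i ≤ 6 ∧ a ∈ pvGroups i := by
  unfold pvRank at h
  obtain ⟨e, hg, rfl⟩ := Option.map_eq_some_iff.1 h
  have h2 : (a, e) ∈ [("bars", ((0:Nat), "Bar")), ("cocktailbars", (0, "Bar")), ("divebars", (0, "Bar")),
      ("sportsbars", (0, "Bar")), ("whiskeybars", (0, "Bar")), ("beerbar", (0, "Bar")),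
      ("breweries", (1, "Brewery")), ("brewpubs", (1, "Brewery")),
      ("wine_bars", (2, "Wine Bar")), ("wineries", (2, "Wine Bar")),
      ("coffee", (3, "Coffee")), ("coffeeroasteries", (3, "Coffee")),
      ("bakeries", (4, "Bakery")),
      ("cafes", (5, "Cafe")), ("cafeteria", (5, "Cafe")),
      ("nightlife", (6, "Nightclub")), ("danceclubs", (6, "Nightclub")),
      ("musicvenues", (6, "Nightclub"))] := PySem.Dict.mem_items_of_get?_eq_some _ hg
  fin_cases h2 <;> decide

theorem pvRank_of_mem (a : String) (i : Nat) (h : a ∈ pvGroups i) : pvRank a = some i := by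
  rcases i with _|_|_|_|_|_|_|i
  all_goals fin_cases h <;> decide

theorem pvRank_iff (a : String) (i : Nat) : pvRank a = some i ↔ a ∈ pvGroups i :=
  ⟨fun h => (pvRank_some a i h).2, pvRank_of_mem a i⟩

-- A's i-th if-condition, as a Bool-valued function of the rank
def pvCondB (categories : List (List (String × String))) (i : Nat) : Bool :=
  (pvGroups i).any fun x => (categories.map (fun c => pvAliasOf c)).contains x

theorem pvA_unfold (categories : List (List (String × String))) :
    categorize_from_yelp categories =
      (if pvCondB categories 0 then "Bar"
       else if pvCondB categories 1 then "Brewery"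
       else if pvCondB categories 2 then "Wine Bar"
       else if pvCondB categories 3 then "Coffee"
       else if pvCondB categories 4 then "Bakery"
       else if pvCondB categories 5 then "Cafe"
       else if pvCondB categories 6 then "Nightclub"
       else "Restaurant") := rfl

theorem pvCondB_iff (categories : List (List (String × String))) (i : Nat) :
    pvCondB categories i = true ↔ ∃ c ∈ categories, pvRank (pvAliasOf c) = some i := by
  unfold pvCondB
  simp only [List.any_eq_true, List.contains_iff_mem, List.mem_map, pvRank_iff]
  constructor
  · rintro ⟨x, hx, c, hc, rfl⟩
    exact ⟨c, hc, hx⟩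
  · rintro ⟨c, hc, hx⟩
    exact ⟨pvAliasOf c, hx, c, hc, rfl⟩

-- ===== VERDICT (by name: the statement is the Claim_ definition above) =====
theorem categorize_from_yelp_spec : Claim_equal_categorize_from_yelp := by
  intro categories _
  show categorize_from_yelp categories = categorize_from_yelp_alt categories
  have hB : categorize_from_yelp_alt categories =
      (match categories.foldl (fun b c => pvMinO b (pvRank (pvAliasOf c))) none with
       | none => "Restaurant" | some k => pvLabel k) := by
    unfold categorize_from_yelp_alt
    rw [show (none : Option (Nat × String)) = (none : Option Nat).map (fun k => (k, pvLabel k)) from rfl,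
        pvFold_eq_min]
    cases categories.foldl (fun b c => pvMinO b (pvRank (pvAliasOf c))) none <;> rfl
  rw [hB]
  cases hM : categories.foldl (fun b c => pvMinO b (pvRank (pvAliasOf c))) none with
  | none =>
    obtain ⟨-, hall⟩ := (pvMin_none categories none).1 hM
    have H : ∀ i, pvCondB categories i = false := by
      intro i
      rw [← Bool.not_eq_true, pvCondB_iff]
      rintro ⟨c, hc, hr⟩
      exact absurd (hall c hc) (by simp [hr])
    rw [pvA_unfold]
    simp [H]
  | some k =>
    obtain ⟨hex, -, hmin⟩ := pvMin_some categories none k hM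
    rcases hex with hx | ⟨c, hc, hr⟩
    · cases hx
    have hk6 : k ≤ 6 := (pvRank_some _ _ hr).1
    have Ht : pvCondB categories k = true := (pvCondB_iff categories k).2 ⟨c, hc, hr⟩
    have Hf : ∀ j, j < k → pvCondB categories j = false := by
      intro j hj
      rw [← Bool.not_eq_true, pvCondB_iff]
      rintro ⟨c', hc', hr'⟩
      exact absurd (hmin c' hc' j hr') (by omega)
    rw [pvA_unfold]
    interval_cases k <;> simp [Ht, Hf, pvLabel]
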